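-- pv_equiv track=rewrite | github.com/PdxCodeGuild/class_shark | 1 Python/solutions/practice.py | latest_letter
-- ===== SOURCE A (Python) =====
-- from string import (ascii_letters as alpha, punctuation)
--
-- def latest_letter(text):
--     '''
--     :text: string
--     returns the letter that appears the latest in the english alphabet
--     >>> latest_letter('pneumonoultramicroscopicsilicovolcanoconiosis')
--     'v'
--     >>> latest_letter('123')
--     ''
--     '''
--     translator = str.maketrans('', '', punctuation + '1234567890')
--     text = text.translate(translator).lower() # remove punctuation and make lowercase
--
--     last = ''
--     for letter in text:
--         if alpha.find(letter) > alpha.find(last):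
--             last = letter
--     return last
--
--     return max(text)
-- ===== SOURCE B (Python) =====
-- from string import (ascii_lowercase, punctuation)
--
-- def latest_letter(text):
--     translator = str.maketrans('', '', punctuation + '1234567890')
--     chars = set(text.translate(translator).lower())
--     for letter in reversed(ascii_lowercase):
--         if letter in chars:
--             return letter
--     return ''
-- ===== Notes on version B (the rewrite author's own statement) =====
-- stated objective: idiomatic
-- what changed: Instead of scanning the text while keeping a running maximum via ascii_letters.find comparisons (a 52-character scan per character), B builds a set of the cleaned characters once and walks the alphabet from 'z' down to 'a', returning the first letter present.
-- intended difference: On texts whose only letters are 'a'/'A', A returns '' because ascii_letters.find('') == 0 == find('a') so 'a' never beats the empty initial running maximum, while B returns 'a', the actual latest (and only) letter, which is the intended answer. — e.g. on latest_letter("a"): A returns "", B returns "a"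
import Mathlib
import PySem

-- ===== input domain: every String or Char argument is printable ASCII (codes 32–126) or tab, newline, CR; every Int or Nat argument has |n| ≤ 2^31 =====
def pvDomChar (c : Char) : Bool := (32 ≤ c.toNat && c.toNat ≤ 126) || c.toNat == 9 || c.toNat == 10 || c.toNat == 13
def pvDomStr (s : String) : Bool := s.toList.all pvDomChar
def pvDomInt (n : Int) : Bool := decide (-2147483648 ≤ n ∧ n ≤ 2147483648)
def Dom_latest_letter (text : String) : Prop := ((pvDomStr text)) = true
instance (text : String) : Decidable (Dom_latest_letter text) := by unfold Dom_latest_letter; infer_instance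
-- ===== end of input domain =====

-- B replaces A's running-maximum scan of the text (comparing ascii_letters.find values) by one set
-- build plus a walk of the alphabet 'z' down to 'a' returning the first letter present (idiomatic);
-- on texts whose only letters are 'a'/'A' the two differ (see D_ below).

-- ===== PORT A =====
-- string.punctuation followed by '1234567890' (the deletion table of str.maketrans('', '', …))
def pyPunctDigits : List Char := "!\"#$%&'()*+,-./:;<=>?@[\\]^_`{|}~1234567890".toList
-- string.ascii_letters
def pyAlpha : List Char := "abcdefghijklmnopqrstuvwxyzABCDEFGHIJKLMNOPQRSTUVWXYZ".toList
-- text.translate(str.maketrans('', '', d)) deletes every character of d and keeps the rest (ported by hand; exact)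
def pyDeletePunctDigits (s : List Char) : List Char := s.filter (fun c => !(pyPunctDigits.contains c))

def latest_letter (text : String) : String :=
  let cleaned := PySem.Chars.lower (pyDeletePunctDigits text.toList)
  let last := cleaned.foldl
    (fun last letter =>
      if PySem.Chars.find pyAlpha [letter] > PySem.Chars.find pyAlpha last then [letter] else last)
    ([] : List Char)
  String.ofList last

-- ===== PORT B =====
-- reversed(ascii_lowercase)
def descLetters : List Char := "zyxwvutsrqponmlkjihgfedcba".toList

def firstPresent (chars : PySem.Set Char) : List Char → String
  | [] => ""
  | c :: rest => if PySem.Set.contains chars c then String.ofList [c] else firstPresent chars rest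

def latest_letter_alt (text : String) : String :=
  let chars : PySem.Set Char := PySem.Set.ofList (PySem.Chars.lower (pyDeletePunctDigits text.toList))
  firstPresent chars descLetters

-- ===== PRECONDITION & SPEC =====
-- On texts whose only letters are 'a'/'A', A returns '' (ascii_letters.find('') == 0 == find('a'),
-- so 'a' never beats the empty initial running maximum) while B returns 'a', the actual latest
-- letter of the text, which is the intended answer.
def D_latest_letter (text : String) : Prop :=
  text.toList.any (fun c => c == 'a' || c == 'A') = true ∧
  text.toList.all (fun c => !(('b' ≤ c && c ≤ 'z') || ('B' ≤ c && c ≤ 'Z'))) = true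
instance (text : String) : Decidable (D_latest_letter text) := by unfold D_latest_letter; infer_instance

def Spec_latest_letter (text : String) (out : String) : Prop := ¬ D_latest_letter text → out = latest_letter_alt text
instance (text : String) (out : String) : Decidable (Spec_latest_letter text out) := by unfold Spec_latest_letter; infer_instance

def pvDiffWitness_latest_letter : String := "a"
def pvDiffWitnessOut_latest_letter : String × String := ("", "a")

-- ===== CLAIM (what is proved, stated in full; the proofs are below) =====
def Claim_unchanged_latest_letter : Prop := ∀ (text : String), Dom_latest_letter text → Spec_latest_letter text (latest_letter text)
def Claim_changed_latest_letter : Prop := Dom_latest_letter (pvDiffWitness_latest_letter) ∧ D_latest_letter (pvDiffWitness_latest_letter) ∧ latest_letter (pvDiffWitness_latest_letter) = pvDiffWitnessOut_latest_letter.1 ∧ latest_letter_alt (pvDiffWitness_latest_letter) = pvDiffWitnessOut_latest_letter.2 ∧ pvDiffWitnessOut_latest_letter.1 ≠ pvDiffWitnessOut_latest_letter.2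
def Claim_exact_latest_letter : Prop := ∀ (text : String), Dom_latest_letter text → D_latest_letter text → latest_letter text ≠ latest_letter_alt text

-- ===== LEMMAS AND PROOFS =====

-- the character codes a cleaned (punctuation/digit-free, lowercased) domain character can have
def AllowedN (c : Char) : Prop :=
  c.toNat = 9 ∨ c.toNat = 10 ∨ c.toNat = 13 ∨ c.toNat = 32 ∨ (97 ≤ c.toNat ∧ c.toNat ≤ 122)

def isBZ (c : Char) : Bool := 'b' ≤ c && c ≤ 'z'

lemma D_iff (text : String) : D_latest_letter text ↔
    (('a' ∈ text.toList ∨ 'A' ∈ text.toList) ∧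
     ∀ c ∈ text.toList, ¬ (('b' ≤ c ∧ c ≤ 'z') ∨ ('B' ≤ c ∧ c ≤ 'Z'))) := by
  unfold D_latest_letter
  constructor
  · rintro ⟨h1, h2⟩
    refine ⟨?_, ?_⟩
    · obtain ⟨c, hc, hca⟩ := List.any_eq_true.mp h1
      simp only [Bool.or_eq_true, beq_iff_eq] at hca
      rcases hca with rfl | rfl
      · exact Or.inl hc
      · exact Or.inr hc
    · intro c hc
      have h := List.all_eq_true.mp h2 c hc
      simp only [Bool.not_eq_true', Bool.or_eq_false_iff, Bool.and_eq_false_iff,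
        decide_eq_false_iff_not] at h
      rcases h with ⟨ha, hb⟩
      rintro (⟨h1', h2'⟩ | ⟨h1', h2'⟩)
      · rcases ha with h | h <;> exact h (by assumption)
      · rcases hb with h | h <;> exact h (by assumption)
  · rintro ⟨h1, h2⟩
    refine ⟨?_, ?_⟩
    · refine List.any_eq_true.mpr ?_
      rcases h1 with h | h
      · exact ⟨'a', h, by decide⟩
      · exact ⟨'A', h, by decide⟩
    · refine List.all_eq_true.mpr ?_
      intro c hc
      have h := h2 c hc
      simp only [Bool.not_eq_true', Bool.or_eq_false_iff, Bool.and_eq_false_iff,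
        decide_eq_false_iff_not]
      constructor
      · by_cases hx : 'b' ≤ c
        · exact Or.inr (fun hy => h (Or.inl ⟨hx, hy⟩))
        · exact Or.inl hx
      · by_cases hx : 'B' ≤ c
        · exact Or.inr (fun hy => h (Or.inr ⟨hx, hy⟩))
        · exact Or.inl hx

-- A's loop body, and an Option-valued abstraction of its state ([] ↔ none, [m] ↔ some m)
def stepA (last : List Char) (c : Char) : List Char :=
  if PySem.Chars.find pyAlpha [c] > PySem.Chars.find pyAlpha last then [c] else last

def stepO (o : Option Char) (c : Char) : Option Char :=
  match o with
  | none => if isBZ c then some c else none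
  | some m => if m < c then some c else some m

def rep : Option Char → List Char
  | none => []
  | some m => [m]

def invO (o : Option Char) : Prop := ∀ m, o = some m → AllowedN m ∧ isBZ m = true

def punctCodes : List Nat := [33, 34, 35, 36, 37, 38, 39, 40, 41, 42, 43, 44, 45, 46, 47, 58, 59, 60, 61, 62, 63, 64, 91, 92, 93, 94, 95, 96, 123, 124, 125, 126, 49, 50, 51, 52, 53, 54, 55, 56, 57, 48]
def alphaCodes : List Nat := [97, 98, 99, 100, 101, 102, 103, 104, 105, 106, 107, 108, 109, 110, 111, 112, 113, 114, 115, 116, 117, 118, 119, 120, 121, 122, 65, 66, 67, 68, 69, 70, 71, 72, 73, 74, 75, 76, 77, 78, 79, 80, 81, 82, 83, 84, 85, 86, 87, 88, 89, 90]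
def descCodes : List Nat := [122, 121, 120, 119, 118, 117, 116, 115, 114, 113, 112, 111, 110, 109, 108, 107, 106, 105, 104, 103, 102, 101, 100, 99, 98, 97]

lemma char_lt_iff (a b : Char) : a < b ↔ a.toNat < b.toNat := by
  rw [Char.lt_def]; exact UInt32.lt_iff_toNat_lt

lemma char_le_iff (a b : Char) : a ≤ b ↔ a.toNat ≤ b.toNat := by
  rw [Char.le_def]; exact UInt32.le_iff_toNat_le

lemma char_eq_iff (a b : Char) : a = b ↔ a.toNat = b.toNat := by
  constructor
  · intro h; rw [h]
  · intro h; rw [← Char.ofNat_toNat a, h, Char.ofNat_toNat]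

lemma toNat_ofNat_small (n : Nat) (h : n ≤ 126) : (Char.ofNat n).toNat = n := by
  rw [Char.toNat_ofNat, if_pos]; exact Or.inl (by omega)

lemma isBZ_iff (c : Char) : isBZ c = true ↔ 98 ≤ c.toNat ∧ c.toNat ≤ 122 := by
  have hb : ('b').toNat = 98 := rfl
  have hz : ('z').toNat = 122 := rfl
  simp only [isBZ, Bool.and_eq_true, decide_eq_true_eq, char_le_iff, hb, hz]

lemma isupper_iff (c : Char) : PySem.Chars.isupper c = true ↔ 65 ≤ c.toNat ∧ c.toNat ≤ 90 := by
  have ha : ('A').toNat = 65 := rfl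
  have hz : ('Z').toNat = 90 := rfl
  simp only [PySem.Chars.isupper, Bool.and_eq_true, decide_eq_true_eq, char_le_iff, ha, hz]

lemma lowerChar_toNat (c : Char) :
    (PySem.Chars.lowerChar c).toNat = if 65 ≤ c.toNat ∧ c.toNat ≤ 90 then c.toNat + 32 else c.toNat := by
  by_cases h : PySem.Chars.isupper c = true
  · have hb := (isupper_iff c).mp h
    rw [if_pos hb]
    simp only [PySem.Chars.lowerChar, h, if_true]
    exact toNat_ofNat_small _ (by omega)
  · have hb : ¬ (65 ≤ c.toNat ∧ c.toNat ≤ 90) := fun hx => h ((isupper_iff c).mpr hx)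
    rw [if_neg hb]
    simp only [PySem.Chars.lowerChar]
    rw [if_neg h]

lemma findgo_nil (c : Char) (k : Nat) : PySem.Chars.find.go [c] [] k = -1 := by
  simp [PySem.Chars.find.go]

lemma findgo_cons (c d : Char) (t : List Char) (k : Nat) :
    PySem.Chars.find.go [c] (d :: t) k
      = if c.toNat = d.toNat then (k : Int) else PySem.Chars.find.go [c] t (k + 1) := by
  simp only [PySem.Chars.find.go, List.isPrefixOf, Bool.and_true, beq_iff_eq, char_eq_iff]

lemma punctCodes_eq : pyPunctDigits.map Char.toNat = punctCodes := by decide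

lemma pyAlpha_eq : pyAlpha = alphaCodes.map Char.ofNat := by decide

lemma desc_eq : descLetters = descCodes.map Char.ofNat := by decide

lemma find_allowed (c : Char) (hc : AllowedN c) :
    PySem.Chars.find pyAlpha [c] = if 97 ≤ c.toNat then ((c.toNat : Int) - 97) else -1 := by
  have h30 : c.toNat = 9 ∨ c.toNat = 10 ∨ c.toNat = 13 ∨ c.toNat = 32 ∨ c.toNat = 97 ∨ c.toNat = 98 ∨ c.toNat = 99 ∨ c.toNat = 100 ∨ c.toNat = 101 ∨ c.toNat = 102 ∨ c.toNat = 103 ∨ c.toNat = 104 ∨ c.toNat = 105 ∨ c.toNat = 106 ∨ c.toNat = 107 ∨ c.toNat = 108 ∨ c.toNat = 109 ∨ c.toNat = 110 ∨ c.toNat = 111 ∨ c.toNat = 112 ∨ c.toNat = 113 ∨ c.toNat = 114 ∨ c.toNat = 115 ∨ c.toNat = 116 ∨ c.toNat = 117 ∨ c.toNat = 118 ∨ c.toNat = 119 ∨ c.toNat = 120 ∨ c.toNat = 121 ∨ c.toNat = 122 := by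
    unfold AllowedN at hc; omega
  rcases h30 with h|h|h|h|h|h|h|h|h|h|h|h|h|h|h|h|h|h|h|h|h|h|h|h|h|h|h|h|h|h <;>
    rw [← Char.ofNat_toNat c, h] <;>
    simp [pyAlpha_eq, alphaCodes, PySem.Chars.find, findgo_cons, findgo_nil, toNat_ofNat_small]

lemma contains_punct_iff (c : Char) : pyPunctDigits.contains c = true ↔ c.toNat ∈ punctCodes := by
  rw [← punctCodes_eq]
  constructor
  · intro h
    exact List.mem_map.mpr ⟨c, List.contains_iff_mem.mp h, rfl⟩
  · intro h
    obtain ⟨d, hd, hde⟩ := List.mem_map.mp h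
    exact List.contains_iff_mem.mpr (by rwa [(char_eq_iff d c).mpr hde] at hd)

lemma dom_case (c : Char) (hd : pvDomChar c = true)
    (hk : (!pyPunctDigits.contains c) = true) : AllowedN (PySem.Chars.lowerChar c) := by
  have hdn : c.toNat = 9 ∨ c.toNat = 10 ∨ c.toNat = 13 ∨ (32 ≤ c.toNat ∧ c.toNat ≤ 126) := by
    simp only [pvDomChar, Bool.or_eq_true, Bool.and_eq_true, decide_eq_true_eq,
      beq_iff_eq] at hd
    omega
  have hnotin : c.toNat ∉ punctCodes := by
    intro hm
    rw [Bool.not_eq_true'] at hk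
    rw [(contains_punct_iff c).mpr hm] at hk
    cases hk
  simp only [punctCodes, List.mem_cons, List.not_mem_nil, or_false] at hnotin
  unfold AllowedN
  rw [lowerChar_toNat]
  split_ifs <;> omega

lemma letter_keep (c : Char)
    (h : (98 ≤ c.toNat ∧ c.toNat ≤ 122) ∨ (66 ≤ c.toNat ∧ c.toNat ≤ 90) ∨ c.toNat = 97 ∨ c.toNat = 65) :
    (!pyPunctDigits.contains c) = true := by
  have hnot : c.toNat ∉ punctCodes := by
    simp only [punctCodes, List.mem_cons, List.not_mem_nil, or_false]
    omega
  rw [Bool.not_eq_true']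
  cases hc : pyPunctDigits.contains c with
  | false => rfl
  | true => exact absurd ((contains_punct_iff c).mp hc) hnot

lemma desc_range : ∀ c ∈ descLetters, 97 ≤ c.toNat ∧ c.toNat ≤ 122 := by
  intro c hc
  rw [desc_eq] at hc
  obtain ⟨n, hn, rfl⟩ := List.mem_map.mp hc
  have hb : 97 ≤ n ∧ n ≤ 122 := by
    have : ∀ m ∈ descCodes, 97 ≤ m ∧ m ≤ 122 := by decide
    exact this n hn
  rw [toNat_ofNat_small n (by omega)]
  exact hb

lemma mem_desc_of_az (m : Char) (h : 97 ≤ m.toNat ∧ m.toNat ≤ 122) : m ∈ descLetters := by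
  have h26 : m.toNat = 97 ∨ m.toNat = 98 ∨ m.toNat = 99 ∨ m.toNat = 100 ∨ m.toNat = 101 ∨ m.toNat = 102 ∨ m.toNat = 103 ∨ m.toNat = 104 ∨ m.toNat = 105 ∨ m.toNat = 106 ∨ m.toNat = 107 ∨ m.toNat = 108 ∨ m.toNat = 109 ∨ m.toNat = 110 ∨ m.toNat = 111 ∨ m.toNat = 112 ∨ m.toNat = 113 ∨ m.toNat = 114 ∨ m.toNat = 115 ∨ m.toNat = 116 ∨ m.toNat = 117 ∨ m.toNat = 118 ∨ m.toNat = 119 ∨ m.toNat = 120 ∨ m.toNat = 121 ∨ m.toNat = 122 := by omega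
  rw [desc_eq]
  rcases h26 with h|h|h|h|h|h|h|h|h|h|h|h|h|h|h|h|h|h|h|h|h|h|h|h|h|h <;>
    rw [← Char.ofNat_toNat m, h] <;>
    simp [descCodes, char_eq_iff, toNat_ofNat_small]

lemma desc_pairwise : descLetters.Pairwise (· > ·) := by
  rw [desc_eq]
  have hp : descCodes.Pairwise (fun a b => a ≤ 126 ∧ b ≤ 126 ∧ b < a) := by decide
  refine hp.map Char.ofNat ?_
  rintro a b ⟨ha, hb, hab⟩
  show Char.ofNat b < Char.ofNat a
  rw [char_lt_iff, toNat_ofNat_small a ha, toNat_ofNat_small b hb]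
  exact hab

lemma stepO_inv (o : Option Char) (c : Char) (hc : AllowedN c) (ho : invO o) :
    invO (stepO o c) := by
  intro m hm
  cases o with
  | none =>
    simp only [stepO] at hm
    split at hm
    · cases hm; exact ⟨hc, by assumption⟩
    · cases hm
  | some m0 =>
    obtain ⟨hm0a, hm0b⟩ := ho m0 rfl
    simp only [stepO] at hm
    split at hm
    · rename_i hlt
      cases hm
      refine ⟨hc, ?_⟩
      have h1 := (isBZ_iff m0).mp hm0b
      have h2 := (char_lt_iff m0 _).mp hlt
      unfold AllowedN at hc
      rw [isBZ_iff]
      omega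
    · cases hm; exact ⟨hm0a, hm0b⟩

lemma stepA_rep (o : Option Char) (c : Char) (hc : AllowedN c) (ho : invO o) :
    stepA (rep o) c = rep (stepO o c) := by
  cases o with
  | none =>
    simp only [rep, stepA, stepO, PySem.Chars.find_nil, find_allowed c hc]
    have h3 : AllowedN c := hc
    unfold AllowedN at h3
    by_cases hb : isBZ c = true
    · have h1 := (isBZ_iff c).mp hb
      rw [if_pos (by rw [if_pos (by omega : 97 ≤ c.toNat)]; omega), hb, if_pos rfl]
    · have h1 : ¬ (98 ≤ c.toNat ∧ c.toNat ≤ 122) := fun h => hb ((isBZ_iff c).mpr h)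
      rw [if_neg (by split_ifs <;> omega), eq_false_of_ne_true hb, if_neg (by simp)]
  | some m =>
    obtain ⟨hm, hbzm⟩ := ho m rfl
    have h1 := (isBZ_iff m).mp hbzm
    simp only [rep, stepA, stepO, find_allowed c hc, find_allowed m hm]
    by_cases h : m < c
    · have hlt := (char_lt_iff m c).mp h
      rw [if_pos h, if_pos (by
        rw [if_pos (by omega : (97:Nat) ≤ c.toNat), if_pos (by omega : (97:Nat) ≤ m.toNat)]
        omega)]
    · have hle : c.toNat ≤ m.toNat := (char_le_iff c m).mp (not_lt.mp h)
      rw [if_neg h, if_neg (by split_ifs <;> omega)]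

lemma foldA_rep (l : List Char) : ∀ o, (∀ c ∈ l, AllowedN c) → invO o →
    l.foldl stepA (rep o) = rep (l.foldl stepO o) := by
  induction l with
  | nil => intro o _ _; rfl
  | cons c l ih =>
    intro o hall ho
    rw [List.foldl_cons, List.foldl_cons, stepA_rep o c (hall c (.head l)) ho]
    exact ih (stepO o c) (fun x hx => hall x (.tail c hx)) (stepO_inv o c (hall c (.head l)) ho)

lemma foldO_spec (l : List Char) : ∀ o, (∀ c ∈ l, AllowedN c) → invO o →
    ((l.foldl stepO o = none → o = none ∧ ∀ c ∈ l, isBZ c = false)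
     ∧ (∀ m, l.foldl stepO o = some m →
         (AllowedN m ∧ isBZ m = true)
         ∧ (o = some m ∨ m ∈ l)
         ∧ (∀ c ∈ l, isBZ c = true → c ≤ m)
         ∧ (∀ m0, o = some m0 → m0 ≤ m))) := by
  induction l with
  | nil =>
    intro o _ ho
    refine ⟨fun h => ⟨h, by simp⟩, fun m hm => ?_⟩
    exact ⟨ho m hm, Or.inl hm, by simp, fun m0 h0 => by rw [h0] at hm; cases hm; exact le_refl _⟩
  | cons c l ih =>
    intro o hall ho
    have hc : AllowedN c := hall c (.head l)
    have hall' : ∀ x ∈ l, AllowedN x := fun x hx => hall x (.tail c hx)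
    have ho' : invO (stepO o c) := stepO_inv o c hc ho
    obtain ⟨ihn, ihs⟩ := ih (stepO o c) hall' ho'
    rw [List.foldl_cons]
    constructor
    · intro h
      obtain ⟨h1, h2⟩ := ihn h
      cases o with
      | none =>
        simp only [stepO] at h1
        split at h1
        · cases h1
        · refine ⟨rfl, ?_⟩
          intro x hx
          rcases List.mem_cons.mp hx with rfl | hx
          · exact eq_false_of_ne_true (by assumption)
          · exact h2 x hx
      | some m0 =>
        simp only [stepO] at h1
        split at h1 <;> cases h1
    · intro m hm
      obtain ⟨hma, hmo, hmax, hmo0⟩ := ihs m hm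
      have hcm : isBZ c = true → c ≤ m := by
        intro hbz
        cases o with
        | none =>
          have : stepO none c = some c := by simp [stepO, hbz]
          exact hmo0 c this
        | some m0 =>
          by_cases hlt : m0 < c
          · exact hmo0 c (by simp [stepO, hlt])
          · exact le_trans (le_of_not_gt hlt) (hmo0 m0 (by simp [stepO, hlt]))
      refine ⟨hma, ?_, ?_, ?_⟩
      · rcases hmo with h | h
        · cases o with
          | none =>
            simp only [stepO] at h
            split at h
            · cases h; exact Or.inr (.head l)
            · cases h
          | some m0 =>
            simp only [stepO] at h
            split at h
            · cases h; exact Or.inr (.head l)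
            · cases h; exact Or.inl rfl
        · exact Or.inr (.tail c h)
      · intro x hx hbz
        rcases List.mem_cons.mp hx with rfl | hx
        · exact hcm hbz
        · exact hmax x hx hbz
      · intro m0 h0
        subst h0
        by_cases hlt : m0 < c
        · exact le_trans (le_of_lt hlt) (hmo0 c (by simp [stepO, hlt]))
        · exact hmo0 m0 (by simp [stepO, hlt])

lemma firstPresent_none (S : PySem.Set Char) :
    ∀ ds, (∀ c ∈ ds, PySem.Set.contains S c = false) → firstPresent S ds = "" := by
  intro ds
  induction ds with
  | nil => intro _; rfl
  | cons d ds ih =>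
    intro h
    simp only [firstPresent, h d (.head ds)]
    exact ih (fun c hc => h c (.tail d hc))

lemma firstPresent_hit (S : PySem.Set Char) :
    ∀ ds, ds.Pairwise (· > ·) → ∀ m ∈ ds, PySem.Set.contains S m = true →
      (∀ c ∈ ds, PySem.Set.contains S c = true → c ≤ m) →
      firstPresent S ds = String.ofList [m] := by
  intro ds
  induction ds with
  | nil => intro _ m hm; cases hm
  | cons d ds ih =>
    intro hp m hm hmem hmax
    obtain ⟨hd, hp'⟩ := List.pairwise_cons.mp hp
    rcases List.mem_cons.mp hm with rfl | hm'
    · simp only [firstPresent, hmem, if_true]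
    · have hdm : d > m := hd m hm'
      have hdS : PySem.Set.contains S d = false := by
        cases hds : PySem.Set.contains S d with
        | false => rfl
        | true => exact absurd (hmax d (.head ds) hds) (not_le_of_gt hdm)
      simp only [firstPresent, hdS, if_false, Bool.false_eq_true]
      exact ih hp' m hm' hmem (fun c hc => hmax c (.tail d hc))

lemma mem_l_iff (text : String) (c : Char) :
    c ∈ PySem.Chars.lower (pyDeletePunctDigits text.toList) ↔
      ∃ c0 ∈ text.toList, (!pyPunctDigits.contains c0) = true ∧ c = PySem.Chars.lowerChar c0 := by
  constructor
  · intro h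
    obtain ⟨c0, hc0, rfl⟩ := List.mem_map.mp h
    obtain ⟨ht, hk⟩ := List.mem_filter.mp hc0
    exact ⟨c0, ht, hk, rfl⟩
  · rintro ⟨c0, ht, hk, rfl⟩
    exact List.mem_map.mpr ⟨c0, List.mem_filter.mpr ⟨ht, hk⟩, rfl⟩

lemma lower_in_bz (c : Char) (h : isBZ (PySem.Chars.lowerChar c) = true) :
    ('b' ≤ c ∧ c ≤ 'z') ∨ ('B' ≤ c ∧ c ≤ 'Z') := by
  have h1 := (isBZ_iff _).mp h
  rw [lowerChar_toNat] at h1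
  have hb : ('b').toNat = 98 := rfl
  have hz : ('z').toNat = 122 := rfl
  have hB : ('B').toNat = 66 := rfl
  have hZ : ('Z').toNat = 90 := rfl
  simp only [char_le_iff, hb, hz, hB, hZ]
  split_ifs at h1 <;> omega

lemma bz_lower (c : Char) (h : ('b' ≤ c ∧ c ≤ 'z') ∨ ('B' ≤ c ∧ c ≤ 'Z')) :
    isBZ (PySem.Chars.lowerChar c) = true := by
  have hb : ('b').toNat = 98 := rfl
  have hz : ('z').toNat = 122 := rfl
  have hB : ('B').toNat = 66 := rfl
  have hZ : ('Z').toNat = 90 := rfl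
  simp only [char_le_iff, hb, hz, hB, hZ] at h
  rw [isBZ_iff, lowerChar_toNat]
  split_ifs <;> omega

lemma noBZ_l (text : String) (hd2 : ∀ c ∈ text.toList, ¬ (('b' ≤ c ∧ c ≤ 'z') ∨ ('B' ≤ c ∧ c ≤ 'Z'))) :
    ∀ c ∈ PySem.Chars.lower (pyDeletePunctDigits text.toList), isBZ c = false := by
  intro c hc
  obtain ⟨c0, ht, _, rfl⟩ := (mem_l_iff text c).mp hc
  cases hb : isBZ (PySem.Chars.lowerChar c0) with
  | false => rfl
  | true => exact absurd (lower_in_bz c0 hb) (hd2 c0 ht)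

lemma a_mem_l (text : String) (ha : 'a' ∈ text.toList ∨ 'A' ∈ text.toList) :
    'a' ∈ PySem.Chars.lower (pyDeletePunctDigits text.toList) := by
  rcases ha with h | h
  · exact (mem_l_iff text 'a').mpr ⟨'a', h, by decide, by decide⟩
  · exact (mem_l_iff text 'a').mpr ⟨'A', h, by decide, by decide⟩

-- B's value on a text of D_: the set contains 'a' and no letter above it, so the scan returns "a"
lemma alt_on_D (text : String) (_hdom : Dom_latest_letter text) (hd : D_latest_letter text) :
    latest_letter_alt text = String.ofList ['a'] := by
  obtain ⟨hd1, hd2⟩ := (D_iff text).mp hd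
  show firstPresent (PySem.Set.ofList (PySem.Chars.lower (pyDeletePunctDigits text.toList))) descLetters = _
  set l := PySem.Chars.lower (pyDeletePunctDigits text.toList) with hl
  have hbz := noBZ_l text hd2
  refine firstPresent_hit _ descLetters desc_pairwise 'a' (by decide)
    ((PySem.Set.contains_iff _ _).mpr ((PySem.Set.mem_ofList _ _).mpr (a_mem_l text hd1))) ?_
  intro c hcd hcs
  have hcl : c ∈ l := (PySem.Set.mem_ofList _ _).mp ((PySem.Set.contains_iff _ _).mp hcs)
  have hr := desc_range c hcd
  have hfalse : isBZ c = false := hbz c hcl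
  have h98 : ¬ (98 ≤ c.toNat ∧ c.toNat ≤ 122) := by
    intro hx
    rw [(isBZ_iff c).mpr hx] at hfalse
    cases hfalse
  have : c.toNat = 97 := by omega
  rw [char_le_iff]
  simp [this]

-- ===== VERDICT (by name: the statement is the Claim_ definition above) =====
theorem latest_letter_spec : Claim_unchanged_latest_letter := by
  intro text hdom
  unfold Spec_latest_letter
  intro hnd
  unfold latest_letter latest_letter_alt
  set l := PySem.Chars.lower (pyDeletePunctDigits text.toList) with hl
  have hall : ∀ c ∈ l, AllowedN c := by
    intro c hcl
    obtain ⟨c0, ht, hk, rfl⟩ := (mem_l_iff text c).mp hcl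
    have hdc : pvDomChar c0 = true := by
      unfold Dom_latest_letter pvDomStr at hdom
      exact (List.all_eq_true.mp hdom) c0 ht
    exact dom_case c0 hdc hk
  have hA : l.foldl stepA ([] : List Char) = rep (l.foldl stepO none) :=
    foldA_rep l none hall (fun m h => by cases h)
  obtain ⟨hn, hs⟩ := foldO_spec l none hall (fun m h => by cases h)
  show String.ofList (l.foldl stepA []) = firstPresent (PySem.Set.ofList l) descLetters
  cases hb : l.foldl stepO none with
  | none =>
    rw [hA, hb]
    have h2 := (hn hb).2
    have hal : 'a' ∉ l := by
      intro hal
      apply hnd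
      rw [D_iff]
      refine ⟨?_, ?_⟩
      · obtain ⟨c0, ht, _, hlc⟩ := (mem_l_iff text 'a').mp hal
        have h97 : (PySem.Chars.lowerChar c0).toNat = 97 := by rw [← hlc]; rfl
        rw [lowerChar_toNat] at h97
        have hc0 : c0.toNat = 97 ∨ c0.toNat = 65 := by split_ifs at h97 <;> omega
        rcases hc0 with h | h
        · exact Or.inl (by rwa [(char_eq_iff c0 'a').mpr h] at ht)
        · exact Or.inr (by rwa [(char_eq_iff c0 'A').mpr h] at ht)
      · intro c hct hr
        have hcode : (98 ≤ c.toNat ∧ c.toNat ≤ 122) ∨ (66 ≤ c.toNat ∧ c.toNat ≤ 90) ∨ c.toNat = 97 ∨ c.toNat = 65 := by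
          have hb : ('b').toNat = 98 := rfl
          have hz : ('z').toNat = 122 := rfl
          have hB : ('B').toNat = 66 := rfl
          have hZ : ('Z').toNat = 90 := rfl
          simp only [char_le_iff, hb, hz, hB, hZ] at hr
          omega
        have hml : PySem.Chars.lowerChar c ∈ l :=
          (mem_l_iff text _).mpr ⟨c, hct, letter_keep c hcode, rfl⟩
        have := h2 _ hml
        rw [bz_lower c hr] at this
        cases this
    rw [firstPresent_none (PySem.Set.ofList l) descLetters ?_]
    · rfl
    · intro c hcd
      cases hcs : PySem.Set.contains (PySem.Set.ofList l) c with
      | false => rfl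
      | true =>
        have hcl : c ∈ l := (PySem.Set.mem_ofList _ _).mp ((PySem.Set.contains_iff _ _).mp hcs)
        have hfalse := h2 c hcl
        have hr := desc_range c hcd
        have h98 : ¬ (98 ≤ c.toNat ∧ c.toNat ≤ 122) := by
          intro hx
          rw [(isBZ_iff c).mpr hx] at hfalse
          cases hfalse
        have h97 : c.toNat = 97 := by omega
        rw [(char_eq_iff c 'a').mpr h97] at hcl
        exact absurd hcl hal
  | some m =>
    obtain ⟨⟨hma, hmbz⟩, hmo, hmax, _⟩ := hs m hb
    have hml : m ∈ l := by
      rcases hmo with h | h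
      · cases h
      · exact h
    rw [hA, hb]
    have hmr := (isBZ_iff m).mp hmbz
    rw [firstPresent_hit (PySem.Set.ofList l) descLetters desc_pairwise m
      (mem_desc_of_az m (by omega))
      ((PySem.Set.contains_iff _ _).mpr ((PySem.Set.mem_ofList _ _).mpr hml))
      ?_]
    · rfl
    · intro c hcd hcs
      have hcl : c ∈ l := (PySem.Set.mem_ofList _ _).mp ((PySem.Set.contains_iff _ _).mp hcs)
      cases hbc : isBZ c with
      | true => exact hmax c hcl hbc
      | false =>
        have hr := desc_range c hcd
        have h98 : ¬ (98 ≤ c.toNat ∧ c.toNat ≤ 122) := by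
          intro hx
          rw [(isBZ_iff c).mpr hx] at hbc
          cases hbc
        rw [char_le_iff]
        omega

set_option maxRecDepth 8000 in
theorem latest_letter_changed : Claim_changed_latest_letter := by
  unfold Claim_changed_latest_letter
  refine ⟨by decide, ⟨by decide, ?_⟩, by decide, by decide, by decide⟩
  simp [pvDiffWitness_latest_letter]

theorem latest_letter_tight : Claim_exact_latest_letter := by
  intro text hdom hd
  have hB := alt_on_D text hdom hd
  unfold latest_letter
  set l := PySem.Chars.lower (pyDeletePunctDigits text.toList) with hl
  have hall : ∀ c ∈ l, AllowedN c := by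
    intro c hcl
    obtain ⟨c0, ht, hk, rfl⟩ := (mem_l_iff text c).mp hcl
    have hdc : pvDomChar c0 = true := by
      unfold Dom_latest_letter pvDomStr at hdom
      exact (List.all_eq_true.mp hdom) c0 ht
    exact dom_case c0 hdc hk
  have hA : l.foldl stepA ([] : List Char) = rep (l.foldl stepO none) :=
    foldA_rep l none hall (fun m h => by cases h)
  obtain ⟨hn, hs⟩ := foldO_spec l none hall (fun m h => by cases h)
  have hbz := noBZ_l text ((D_iff text).mp hd).2
  have hnone : l.foldl stepO none = none := by
    cases hfold : l.foldl stepO none with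
    | none => rfl
    | some m =>
      obtain ⟨⟨_, hmbz⟩, hmo, _, _⟩ := hs m hfold
      have hml : m ∈ l := by
        rcases hmo with h | h
        · cases h
        · exact h
      rw [hbz m hml] at hmbz
      cases hmbz
  show String.ofList (l.foldl stepA []) ≠ latest_letter_alt text
  rw [hA, hnone, hB]
  decide
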